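-- pv_equiv track=rewrite | github.com/OlfactoryBehaviorLab/dewan_calcium | dewan_calcium/helpers/HFvFM.py | get_trial_labels
-- ===== SOURCE A (Python) =====
-- def get_trial_labels(num_trials, HF_first):
--     import math
--     trial_labels = []
--     temp_num_trials = math.ceil(num_trials / 2)
--
--     for i in range(temp_num_trials):
--         if HF_first:
--             trial_labels.append(f'HF-{i + 1}')
--             trial_labels.append(f'FM-{i + 1}')
--         else:
--             trial_labels.append(f'FM-{i + 1}')
--             trial_labels.append(f'HF-{i + 1}')
--
--     if num_trials % 2 == 1:
--         trial_labels = trial_labels[:-1]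
--
--     return trial_labels
-- ===== SOURCE B (Python) =====
-- def get_trial_labels(num_trials, HF_first):
--     return [('HF' if (i % 2 == 0) == bool(HF_first) else 'FM') + f'-{i // 2 + 1}'
--             for i in range(num_trials)]
-- ===== Notes on version B (the rewrite author's own statement) =====
-- stated objective: simpler
-- what changed: Replaces the build-pairs-then-trim loop over ceil(n/2) with a single one-label-per-iteration comprehension over range(n), computing each prefix from i's parity and the pair number as i//2+1, so no trailing slice is needed.
import Mathlib
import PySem

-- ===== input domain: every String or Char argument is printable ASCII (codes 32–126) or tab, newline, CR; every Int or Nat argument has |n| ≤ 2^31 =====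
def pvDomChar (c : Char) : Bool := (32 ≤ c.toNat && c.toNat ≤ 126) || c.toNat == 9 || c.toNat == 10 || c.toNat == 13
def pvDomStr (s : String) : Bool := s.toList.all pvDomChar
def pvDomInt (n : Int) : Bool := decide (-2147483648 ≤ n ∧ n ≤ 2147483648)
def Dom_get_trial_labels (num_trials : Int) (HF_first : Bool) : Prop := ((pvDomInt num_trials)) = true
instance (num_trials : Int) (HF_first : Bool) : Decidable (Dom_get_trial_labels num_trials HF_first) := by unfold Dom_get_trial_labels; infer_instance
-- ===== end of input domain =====

-- B replaces A's build-pairs-then-trim loop by one label per index over range(num_trials) (simpler; no trailing slice).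

-- ===== PORT A =====
def get_trial_labels (num_trials : Int) (HF_first : Bool) : List String :=
  -- math.ceil(num_trials / 2) = -((-num_trials) // 2); exact for |num_trials| ≤ 2^31 (float /2 is exact there)
  let temp_num_trials : Int := -(PySem.Int.floordiv (-num_trials) 2)
  let trial_labels := (PySem.List.pyRange 0 temp_num_trials 1).foldl (fun acc i =>
    if HF_first then
      acc ++ ["HF-" ++ PySem.Int.toStr (i + 1)] ++ ["FM-" ++ PySem.Int.toStr (i + 1)]
    else
      acc ++ ["FM-" ++ PySem.Int.toStr (i + 1)] ++ ["HF-" ++ PySem.Int.toStr (i + 1)]) []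
  if PySem.Int.mod num_trials 2 = 1 then PySem.List.slice trial_labels none (some (-1))
  else trial_labels

-- ===== PORT B =====
def get_trial_labels_alt (num_trials : Int) (HF_first : Bool) : List String :=
  (PySem.List.pyRange 0 num_trials 1).map (fun i =>
    (if (PySem.Int.mod i 2 = 0) = (HF_first = true) then "HF" else "FM")
      ++ "-" ++ PySem.Int.toStr (PySem.Int.floordiv i 2 + 1))

-- ===== PRECONDITION & SPEC =====
def Spec_get_trial_labels (num_trials : Int) (HF_first : Bool) (out : List String) : Prop := out = get_trial_labels_alt num_trials HF_first
instance (num_trials : Int) (HF_first : Bool) (out : List String) : Decidable (Spec_get_trial_labels num_trials HF_first out) := by unfold Spec_get_trial_labels; infer_instance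

-- ===== CLAIM (what is proved, stated in full; the proofs are below) =====
def Claim_equal_get_trial_labels : Prop := ∀ (num_trials : Int) (HF_first : Bool), Dom_get_trial_labels num_trials HF_first → Spec_get_trial_labels num_trials HF_first (get_trial_labels num_trials HF_first)

-- ===== LEMMAS AND PROOFS =====

-- A's pair-building loop over range(k) equals B's label map over range(2k).
theorem loopA_eq_mapB (hf : Bool) (k : Nat) :
    (PySem.List.pyRange 0 (k : Int) 1).foldl (fun acc i =>
      if hf then
        acc ++ ["HF-" ++ PySem.Int.toStr (i + 1)] ++ ["FM-" ++ PySem.Int.toStr (i + 1)]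
      else
        acc ++ ["FM-" ++ PySem.Int.toStr (i + 1)] ++ ["HF-" ++ PySem.Int.toStr (i + 1)]) []
    = (PySem.List.pyRange 0 ((2 * k : Nat) : Int) 1).map (fun i =>
        (if (PySem.Int.mod i 2 = 0) = (hf = true) then "HF" else "FM")
          ++ "-" ++ PySem.Int.toStr (PySem.Int.floordiv i 2 + 1)) := by
  induction k with
  | zero => simp [PySem.List.pyRange_one_eq_nil]
  | succ k ih =>
    have h1 : ((k + 1 : Nat) : Int) = (k : Int) + 1 := by push_cast; ring
    have h2 : ((2 * (k + 1) : Nat) : Int) = (((2 * k : Nat) : Int) + 1) + 1 := by push_cast; ring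
    rw [h1, PySem.List.pyRange_one_succ_right (show (0:Int) ≤ (k:Int) by positivity), List.foldl_append, ih,
        h2, PySem.List.pyRange_one_succ_right (show (0:Int) ≤ ((2*k:Nat):Int)+1 by positivity),
        PySem.List.pyRange_one_succ_right (show (0:Int) ≤ ((2*k:Nat):Int) by positivity),
        List.map_append, List.map_append]
    cases hf <;> simp <;> congr 1 <;> omega

-- ===== VERDICT (by name: the statement is the Claim_ definition above) =====
theorem get_trial_labels_spec : Claim_equal_get_trial_labels := by
  intro n hf _
  unfold Spec_get_trial_labels get_trial_labels get_trial_labels_alt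
  have hm : PySem.Int.mod n 2 = n % 2 := PySem.Int.mod_eq_emod_of_pos (by norm_num)
  have hd : PySem.Int.floordiv (-n) 2 = (-n) / 2 := PySem.Int.floordiv_eq_ediv_of_pos (by norm_num)
  rcases le_or_gt n 0 with hn | hn
  · -- empty result on both sides
    have hceil : -(PySem.Int.floordiv (-n) 2) ≤ 0 := by rw [hd]; omega
    simp only [PySem.List.pyRange_one_eq_nil hceil, PySem.List.pyRange_one_eq_nil hn,
      List.foldl_nil, List.map_nil]
    split <;> simp [PySem.List.slice_to_neg_one]
  · -- n > 0: n = m as a Nat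
    obtain ⟨m, rfl⟩ : ∃ m : Nat, n = (m : Int) := ⟨n.toNat, by omega⟩
    rcases Nat.even_or_odd m with ⟨j, hj⟩ | ⟨j, hj⟩
    · -- even: no trim, ceil = j
      have hceil : -(PySem.Int.floordiv (-(m : Int)) 2) = (j : Int) := by rw [hd]; omega
      have hmod : ¬ PySem.Int.mod (m : Int) 2 = 1 := by rw [hm]; omega
      have hcast : ((m : Nat) : Int) = ((2 * j : Nat) : Int) := by push_cast; omega
      rw [hceil, if_neg hmod, hcast]
      exact loopA_eq_mapB hf j
    · -- odd: trim one label, ceil = j + 1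
      have hceil : -(PySem.Int.floordiv (-(m : Int)) 2) = ((j + 1 : Nat) : Int) := by
        rw [hd]; push_cast; omega
      have hmod : PySem.Int.mod (m : Int) 2 = 1 := by rw [hm]; omega
      rw [hceil, if_pos hmod, loopA_eq_mapB hf (j + 1)]
      have hsplit : ((2 * (j + 1) : Nat) : Int) = ((2 * j + 1 : Nat) : Int) + 1 := by push_cast; ring
      rw [hsplit, PySem.List.pyRange_one_succ_right (show (0:Int) ≤ ((2*j+1:Nat):Int) by positivity),
        List.map_append, PySem.List.slice_to_neg_one]
      have hcast : ((m : Nat) : Int) = ((2 * j + 1 : Nat) : Int) := by push_cast; omega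
      simp only [List.map_cons, List.map_nil, List.dropLast_concat, hcast]
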